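-- pv_equiv track=rewrite | github.com/aqkfatmtvvfb/DBC_converter_py | csv_process.py | process_csv_lines
-- ===== SOURCE A (Python) =====
-- def process_csv_lines(csv_lines):
--     processed_lines = []
--     temp_line = []
--     for line in csv_lines:
--         temp_line.extend(line)
--         if (temp_line.count('"') % 2) == 0:
--             processed_lines.append(temp_line)
--             temp_line = []
--     return processed_lines
-- ===== SOURCE B (Python) =====
-- def process_csv_lines(csv_lines):
--     # two-stage: (1) find cut positions where cumulative quote parity is even,
--     # (2) flatten each slice between consecutive cuts
--     cuts = []
--     parity = 0
--     i = 0
--     for line in csv_lines: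
--         parity = (parity + line.count('"')) % 2
--         if parity == 0:
--             cuts.append(i + 1)
--         i += 1
--     groups = []
--     start = 0
--     for end in cuts:
--         groups.append([cell for line in csv_lines[start:end] for cell in line])
--         start = end
--     return groups
-- ===== Notes on version B (the rewrite author's own statement) =====
-- stated objective: alternative
-- what changed: B works in two staged passes: it first computes the list of cut indices where the cumulative quote-count parity is even, then builds each group by flattening the slice of lines between consecutive cuts, instead of A's single pass that recounts the growing accumulated buffer on every line.
import Mathlib
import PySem

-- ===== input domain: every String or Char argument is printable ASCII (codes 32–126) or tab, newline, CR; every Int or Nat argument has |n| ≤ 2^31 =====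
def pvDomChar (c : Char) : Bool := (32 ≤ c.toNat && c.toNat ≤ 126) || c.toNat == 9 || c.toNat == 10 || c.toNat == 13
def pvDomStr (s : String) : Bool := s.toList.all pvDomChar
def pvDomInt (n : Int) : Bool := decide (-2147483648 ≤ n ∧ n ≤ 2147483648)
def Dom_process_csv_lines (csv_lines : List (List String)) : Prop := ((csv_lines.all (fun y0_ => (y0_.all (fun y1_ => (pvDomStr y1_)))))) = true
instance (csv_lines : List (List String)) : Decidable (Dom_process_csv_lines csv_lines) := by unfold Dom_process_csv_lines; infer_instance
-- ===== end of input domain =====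

-- B replaces A's one-pass buffer-recounting loop by two staged passes:
-- a first pass computing the cut indices where cumulative quote parity is even,
-- and a second pass flattening the slice of lines between consecutive cuts
-- (objective: alternative).

-- ===== PORT A =====
def pvStepA (st : List (List String) × List String) (line : List String) :
    List (List String) × List String :=
  let temp := st.2 ++ line
  if PySem.List.count temp "\"" % 2 == 0 then (st.1 ++ [temp], []) else (st.1, temp)

def process_csv_lines (csv_lines : List (List String)) : List (List String) :=
  (csv_lines.foldl pvStepA ([], [])).1

-- ===== PORT B =====
-- stage 1 of Source B: the (cuts, parity, i) loop
def pvStepCut (st : List Nat × Nat × Nat) (line : List String) : List Nat × Nat × Nat :=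
  let parity := (st.2.1 + PySem.List.count line "\"") % 2
  let cuts := if parity = 0 then st.1 ++ [st.2.2 + 1] else st.1
  (cuts, parity, st.2.2 + 1)

-- stage 2 of Source B: the (groups, start) loop; csv_lines[start:end] is ported as
-- drop/take, exact here because 0 ≤ start ≤ end ≤ length holds along the fold
def pvStepGroup (full : List (List String)) (st : List (List String) × Nat) (e : Nat) :
    List (List String) × Nat :=
  (st.1 ++ [((full.drop st.2).take (e - st.2)).flatten], e)

def process_csv_lines_alt (csv_lines : List (List String)) : List (List String) :=
  let cuts := (csv_lines.foldl pvStepCut ([], 0, 0)).1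
  (cuts.foldl (pvStepGroup csv_lines) ([], 0)).1

-- ===== PRECONDITION & SPEC =====
def Spec_process_csv_lines (csv_lines : List (List String)) (out : List (List String)) : Prop := out = process_csv_lines_alt csv_lines
instance (csv_lines : List (List String)) (out : List (List String)) : Decidable (Spec_process_csv_lines csv_lines out) := by unfold Spec_process_csv_lines; infer_instance

-- ===== CLAIM (what is proved, stated in full; the proofs are below) =====
def Claim_equal_process_csv_lines : Prop := ∀ (csv_lines : List (List String)), Dom_process_csv_lines csv_lines → Spec_process_csv_lines csv_lines (process_csv_lines csv_lines)

-- ===== LEMMAS AND PROOFS =====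

-- reference recursion: the common grouping semantics both ports compute
def specGrp : List (List String) → List String → List (List String)
  | [], _ => []
  | l :: rest, temp =>
    let t := temp ++ l
    if t.count "\"" % 2 = 0 then t :: specGrp rest [] else specGrp rest t

def cutsAux : List (List String) → Nat → Nat → List Nat
  | [], _, _ => []
  | l :: rest, p, k =>
    let p' := (p + l.count "\"") % 2
    if p' = 0 then (k + 1) :: cutsAux rest p' (k + 1) else cutsAux rest p' (k + 1)

def groupsFrom (full : List (List String)) : List Nat → Nat → List (List String)
  | [], _ => []
  | e :: cs, s => ((full.drop s).take (e - s)).flatten :: groupsFrom full cs e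

lemma foldA_eq (lines : List (List String)) (proc : List (List String)) (temp : List String) :
    (lines.foldl pvStepA (proc, temp)).1 = proc ++ specGrp lines temp := by
  induction lines generalizing proc temp with
  | nil => simp [specGrp]
  | cons l rest ih =>
    simp only [List.foldl_cons, pvStepA, specGrp, PySem.List.count_eq]
    by_cases h : (temp ++ l).count "\"" % 2 = 0 <;>
      simp [List.count_append] at h <;> simp [h, ih]

lemma foldCut_eq (lines : List (List String)) (cuts : List Nat) (p k : Nat) :
    (lines.foldl pvStepCut (cuts, p, k)).1 = cuts ++ cutsAux lines p k := by
  induction lines generalizing cuts p k with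
  | nil => simp [cutsAux]
  | cons l rest ih =>
    simp only [List.foldl_cons, pvStepCut, cutsAux, PySem.List.count_eq]
    by_cases h : (p + l.count "\"") % 2 = 0 <;> simp [h, ih]

lemma foldGroup_eq (full : List (List String)) (cuts : List Nat)
    (acc : List (List String)) (s : Nat) :
    (cuts.foldl (pvStepGroup full) (acc, s)).1 = acc ++ groupsFrom full cuts s := by
  induction cuts generalizing acc s with
  | nil => simp [groupsFrom]
  | cons e cs ih => simp [List.foldl_cons, pvStepGroup, groupsFrom, ih]

lemma drop_take_succ (full : List (List String)) (s k : Nat) (l : List String)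
    (r : List (List String)) (hs : s ≤ k) (hd : full.drop k = l :: r) :
    (full.drop s).take (k + 1 - s) = (full.drop s).take (k - s) ++ [l] := by
  have hk1 : k + 1 - s = (k - s) + 1 := by omega
  rw [hk1, List.take_add_one]
  have h1 : (full.drop s)[k - s]? = full[k]? := by
    rw [List.getElem?_drop]; congr 1; omega
  have h2 : full[k]? = some l := by
    have h0 : (full.drop k)[0]? = full[k + 0]? := List.getElem?_drop
    simpa [hd] using h0.symm
  simp [h1, h2]

lemma main_inv (rest full : List (List String)) (s k : Nat) (hs : s ≤ k)
    (hd : full.drop k = rest) :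
    groupsFrom full (cutsAux rest (((full.drop s).take (k - s)).flatten.count "\"" % 2) k) s
      = specGrp rest ((full.drop s).take (k - s)).flatten := by
  induction rest generalizing s k with
  | nil => simp [cutsAux, specGrp, groupsFrom]
  | cons l r ih =>
    have hdrop1 : full.drop (k + 1) = r := by
      have : full.drop (k + 1) = (full.drop k).drop 1 := by
        rw [List.drop_drop]
      simp [this, hd]
    have htake : (full.drop s).take (k + 1 - s) = (full.drop s).take (k - s) ++ [l] :=
      drop_take_succ full s k l r hs hd
    set temp := ((full.drop s).take (k - s)).flatten with htemp
    have hpar : (temp.count "\"" % 2 + l.count "\"") % 2 = (temp ++ l).count "\"" % 2 := by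
      rw [List.count_append]; omega
    simp only [cutsAux, specGrp, hpar]
    by_cases h : (temp ++ l).count "\"" % 2 = 0
    · simp only [h, if_true, groupsFrom]
      have hhead : ((full.drop s).take (k + 1 - s)).flatten = temp ++ l := by
        rw [htake]; simp [htemp]
      rw [hhead]
      have htail := ih (k + 1) (k + 1) (le_refl _) hdrop1
      simpa [Nat.sub_self] using htail
    · simp only [h, if_false]
      have := ih s (k + 1) (by omega) hdrop1
      rw [htake] at this
      simpa [htemp, List.flatten_append] using this

-- ===== VERDICT (by name: the statement is the Claim_ definition above) =====
theorem process_csv_lines_spec : Claim_equal_process_csv_lines := by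
  intro csv_lines _
  unfold Spec_process_csv_lines process_csv_lines process_csv_lines_alt
  rw [foldA_eq, foldCut_eq, foldGroup_eq]
  have := main_inv csv_lines csv_lines 0 0 (le_refl _) (by simp)
  simpa using this.symm
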